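-- pv_equiv track=rewrite | github.com/tkdrnjs0621/hippovar | merge_dataset_ner.py | map_merge_cc_sametitle
-- ===== SOURCE A (Python) =====
-- def map_merge_cc_sametitle(row):
--     a = {}
--     b= []
--     for tmp in row["merged_context"]:
--         if tmp[0] not in a:
--             a[tmp[0]]=tmp[1]
--         else:
--             a[tmp[0]]+=" "+tmp[1]
--     for k,v in a.items():
--         b.append([k,v])
--     row["merged_context"]=b
--     return row
-- ===== SOURCE B (Python) =====
-- def map_merge_cc_sametitle(row):
--     ctx = row["merged_context"]
--     titles = []
--     for tmp in ctx:
--         if tmp[0] not in titles: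
--             titles.append(tmp[0])
--     row["merged_context"] = [
--         [t, " ".join(tmp[1] for tmp in ctx if tmp[0] == t)] for t in titles
--     ]
--     return row
-- ===== Notes on version B (the rewrite author's own statement) =====
-- stated objective: alternative
-- what changed: B uses no dictionary at all: it first collects the distinct titles in first-occurrence order, then for each title makes a separate filtering pass over the whole context and joins that title's fragments once, instead of A's single dict fold with a present/absent branch that grows a running string per key.
import Mathlib
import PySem

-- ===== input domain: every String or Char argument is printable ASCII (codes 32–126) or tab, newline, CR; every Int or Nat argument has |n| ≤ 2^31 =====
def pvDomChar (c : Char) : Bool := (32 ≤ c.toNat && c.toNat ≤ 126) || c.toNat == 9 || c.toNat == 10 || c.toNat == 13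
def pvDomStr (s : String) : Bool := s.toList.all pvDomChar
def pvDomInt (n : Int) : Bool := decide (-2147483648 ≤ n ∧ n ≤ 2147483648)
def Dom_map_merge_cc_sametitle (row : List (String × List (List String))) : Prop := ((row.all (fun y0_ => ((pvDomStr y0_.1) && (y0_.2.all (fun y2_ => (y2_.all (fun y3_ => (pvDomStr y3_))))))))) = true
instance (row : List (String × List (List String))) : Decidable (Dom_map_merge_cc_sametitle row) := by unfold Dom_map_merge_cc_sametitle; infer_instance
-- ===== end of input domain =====

-- B drops the dictionary entirely: it collects distinct titles in first-occurrence order, then per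
-- title filters the context and joins its fragments once; equivalence of the RETURN value is proved
-- (both Pythons mutate the row dict in place by reassigning the same single key).


-- tmp[0] / tmp[1] of a context entry (Pre_ guarantees both exist; the .getD "" is never reached there)
def pvKey (tmp : List String) : String := (PySem.List.pyGet? tmp 0).getD ""
def pvFrag (tmp : List String) : String := (PySem.List.pyGet? tmp 1).getD ""

-- ===== PORT A =====
def map_merge_cc_sametitle (row : List (String × List (List String))) : List (String × List (List String)) :=
  match PySem.Dict.get? (PySem.Dict.mk row) "merged_context" with
  | none => row   -- Python raises KeyError here; excluded by Pre_
  | some ctx =>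
    let a := ctx.foldl (fun (a : PySem.Dict String String) tmp =>
      if ¬ (a.contains (pvKey tmp) = true) then
        a.insert (pvKey tmp) (pvFrag tmp)
      else
        a.insert (pvKey tmp) (a.getD (pvKey tmp) "" ++ " " ++ pvFrag tmp)) PySem.Dict.empty
    let b := a.items.foldl (fun (b : List (List String)) p => b ++ [[p.1, p.2]]) []
    ((PySem.Dict.mk row).insert "merged_context" b).items

-- ===== PORT B =====
-- B's first loop: the distinct titles of the context, in first-occurrence order
def pvTitles (ctx : List (List String)) : List String :=
  ctx.foldl (fun ts tmp => if pvKey tmp ∈ ts then ts else ts ++ [pvKey tmp]) []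
-- B's comprehension filter: the fragments of the context carrying title t, in order
def pvFrags (ctx : List (List String)) (t : String) : List String :=
  (ctx.filter (fun tmp => pvKey tmp == t)).map pvFrag

def map_merge_cc_sametitle_alt (row : List (String × List (List String))) : List (String × List (List String)) :=
  match PySem.Dict.get? (PySem.Dict.mk row) "merged_context" with
  | none => row   -- KeyError in Python; excluded by Pre_
  | some ctx =>
    ((PySem.Dict.mk row).insert "merged_context"
      ((pvTitles ctx).map (fun t => [t, PySem.Str.join " " (pvFrags ctx t)]))).items

-- ===== PRECONDITION & SPEC =====
-- Pre_ excludes exactly the inputs where Python A raises: a missing "merged_context" key (KeyError)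
-- or a context entry with fewer than two fields (IndexError on tmp[0]/tmp[1]).
def Pre_map_merge_cc_sametitle (row : List (String × List (List String))) : Prop :=
  (PySem.Dict.get? (PySem.Dict.mk row) "merged_context").isSome = true ∧
  ∀ tmp ∈ (PySem.Dict.get? (PySem.Dict.mk row) "merged_context").getD [], 2 ≤ tmp.length
instance (row : List (String × List (List String))) : Decidable (Pre_map_merge_cc_sametitle row) := by unfold Pre_map_merge_cc_sametitle; infer_instance
def pvWitness_map_merge_cc_sametitle : (List (String × List (List String))) :=
  [("merged_context", [["t", "x"], ["t", "y"], ["u", "z"]])]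
def Spec_map_merge_cc_sametitle (row : List (String × List (List String))) (out : List (String × List (List String))) : Prop := out = map_merge_cc_sametitle_alt row
instance (row : List (String × List (List String))) (out : List (String × List (List String))) : Decidable (Spec_map_merge_cc_sametitle row out) := by unfold Spec_map_merge_cc_sametitle; infer_instance

-- ===== CLAIM (what is proved, stated in full; the proofs are below) =====
def Claim_equal_map_merge_cc_sametitle : Prop := ∀ (row : List (String × List (List String))), Dom_map_merge_cc_sametitle row → Pre_map_merge_cc_sametitle row → Spec_map_merge_cc_sametitle row (map_merge_cc_sametitle row)

-- ===== LEMMAS AND PROOFS =====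

lemma chars_join_append_singleton (sep f : List Char) (v : List (List Char)) (h : v ≠ []) :
    PySem.Chars.join sep (v ++ [f]) = PySem.Chars.join sep v ++ sep ++ f := by
  induction v with
  | nil => simp at h
  | cons a t ih =>
    cases t with
    | nil => simp [PySem.Chars.join_cons_cons, PySem.Chars.join_singleton]
    | cons b r =>
      have := ih (by simp)
      simp only [List.cons_append, PySem.Chars.join_cons_cons] at this ⊢
      simp [this]

lemma str_join_append_singleton (v : List String) (f : String) (h : v ≠ []) :
    PySem.Str.join " " (v ++ [f]) = PySem.Str.join " " v ++ " " ++ f := by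
  have hch := chars_join_append_singleton " ".toList f.toList (List.map String.toList v)
    (by simpa using h)
  apply String.toList_injective
  simp only [PySem.Str.join, List.map_append, List.map_cons, List.map_nil, hch,
    String.toList_ofList, String.toList_append]

lemma str_join_singleton (f : String) : PySem.Str.join " " [f] = f := by
  apply String.toList_injective
  simp [PySem.Str.join, PySem.Chars.join_singleton]

lemma titles_fold_nodup (l : List (List String)) (ts : List String) (h : ts.Nodup) :
    (l.foldl (fun ts tmp => if pvKey tmp ∈ ts then ts else ts ++ [pvKey tmp]) ts).Nodup := by
  induction l generalizing ts with
  | nil => exact h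
  | cons tmp r ih =>
    simp only [List.foldl_cons]
    split
    · exact ih ts h
    · rename_i hn
      refine ih _ ?_
      simp only [List.nodup_append, List.nodup_cons]
      exact ⟨h, by simp, by simp; exact fun a ha he => hn (he ▸ ha)⟩

lemma mem_titles_fold (l : List (List String)) (ts : List String) (t : String) :
    t ∈ l.foldl (fun ts tmp => if pvKey tmp ∈ ts then ts else ts ++ [pvKey tmp]) ts ↔
    t ∈ ts ∨ ∃ x ∈ l, pvKey x = t := by
  induction l generalizing ts with
  | nil => simp
  | cons tmp r ih =>
    simp only [List.foldl_cons]
    split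
    · rw [ih]; rename_i hmem
      constructor
      · rintro (h | ⟨x, hx, hk⟩)
        · exact Or.inl h
        · exact Or.inr ⟨x, List.mem_cons_of_mem _ hx, hk⟩
      · rintro (h | ⟨x, hx, hk⟩)
        · exact Or.inl h
        · rcases List.mem_cons.mp hx with hx | hx
          · subst hx; subst hk; exact Or.inl hmem
          · exact Or.inr ⟨x, hx, hk⟩
    · rw [ih]
      constructor
      · rintro (h | ⟨x, hx, hk⟩)
        · rcases List.mem_append.mp h with h | h
          · exact Or.inl h
          · exact Or.inr ⟨tmp, List.mem_cons_self, (List.mem_singleton.mp h).symm⟩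
        · exact Or.inr ⟨x, List.mem_cons_of_mem _ hx, hk⟩
      · rintro (h | ⟨x, hx, hk⟩)
        · exact Or.inl (List.mem_append.mpr (Or.inl h))
        · rcases List.mem_cons.mp hx with hx | hx
          · subst hx
            exact Or.inl (List.mem_append.mpr (Or.inr (List.mem_singleton.mpr hk.symm)))
          · exact Or.inr ⟨x, hx, hk⟩

lemma mem_titles (ctx : List (List String)) (t : String) :
    t ∈ pvTitles ctx ↔ ∃ x ∈ ctx, pvKey x = t := by
  rw [pvTitles, mem_titles_fold]; simp

lemma titles_nodup (ctx : List (List String)) : (pvTitles ctx).Nodup :=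
  titles_fold_nodup ctx [] (by simp)

lemma titles_append_singleton (s : List (List String)) (tmp : List String) :
    pvTitles (s ++ [tmp]) =
      if pvKey tmp ∈ pvTitles s then pvTitles s else pvTitles s ++ [pvKey tmp] := by
  simp [pvTitles, List.foldl_append]

lemma frags_append_singleton (s : List (List String)) (tmp : List String) (t : String) :
    pvFrags (s ++ [tmp]) t =
      pvFrags s t ++ (if pvKey tmp == t then [pvFrag tmp] else []) := by
  simp only [pvFrags, List.filter_append, List.map_append]
  congr 1
  cases hbe : (pvKey tmp == t) <;> simp [List.filter, hbe]

lemma frags_ne_nil_of_mem_titles (s : List (List String)) (t : String) (h : t ∈ pvTitles s) :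
    pvFrags s t ≠ [] := by
  rcases (mem_titles s t).mp h with ⟨x, hx, hk⟩
  simp only [pvFrags, ne_eq, List.map_eq_nil_iff, List.filter_eq_nil_iff]
  intro hall
  exact (hall x hx) (by simp [hk])

lemma frags_eq_nil_of_not_mem_titles (s : List (List String)) (t : String) (h : t ∉ pvTitles s) :
    pvFrags s t = [] := by
  simp only [pvFrags, List.map_eq_nil_iff, List.filter_eq_nil_iff]
  intro x hx hk
  exact h ((mem_titles s t).mpr ⟨x, hx, by simpa using hk⟩)

-- the loop invariant: after processing 'seen', A's dict lists each title seen so far, in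
-- first-occurrence order, paired with the space-join of its fragments seen so far
lemma loop_inv (rest seen : List (List String)) (a : PySem.Dict String String)
    (hitems : a.items = (pvTitles seen).map (fun t => (t, PySem.Str.join " " (pvFrags seen t)))) :
    (rest.foldl (fun (a : PySem.Dict String String) tmp =>
      if ¬ (a.contains (pvKey tmp) = true) then
        a.insert (pvKey tmp) (pvFrag tmp)
      else
        a.insert (pvKey tmp) (a.getD (pvKey tmp) "" ++ " " ++ pvFrag tmp)) a).items =
    (pvTitles (seen ++ rest)).map (fun t => (t, PySem.Str.join " " (pvFrags (seen ++ rest) t))) := by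
  induction rest generalizing seen a with
  | nil => simpa using hitems
  | cons tmp r ih =>
    have hkeys : a.keys = pvTitles seen := by
      simp only [PySem.Dict.keys, hitems, List.map_map]
      exact List.map_id _
    have hnd : a.keys.Nodup := hkeys ▸ titles_nodup seen
    have hconts : a.contains (pvKey tmp) = true ↔ pvKey tmp ∈ pvTitles seen := by
      rw [PySem.Dict.contains_eq_decide_mem_keys, hkeys]; simp
    simp only [List.foldl_cons]
    have hassoc : seen ++ tmp :: r = (seen ++ [tmp]) ++ r := by simp
    rw [hassoc]
    by_cases hmem : pvKey tmp ∈ pvTitles seen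
    · have hac : a.contains (pvKey tmp) = true := hconts.mpr hmem
      rw [if_neg (by simp [hac])]
      apply ih
      have hgetD : a.getD (pvKey tmp) "" = PySem.Str.join " " (pvFrags seen (pvKey tmp)) := by
        have : (pvKey tmp, PySem.Str.join " " (pvFrags seen (pvKey tmp))) ∈ a.items := by
          rw [hitems]; exact List.mem_map.mpr ⟨pvKey tmp, (by simpa using hmem), rfl⟩
        exact PySem.Dict.getD_of_mem_items a this hnd ""
      rw [PySem.Dict.items_insert_of_contains a _ hac, hitems, List.map_map,
          titles_append_singleton, if_pos hmem]
      apply List.map_congr_left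
      intro t ht
      by_cases hpk : t = pvKey tmp
      · subst hpk
        simp only [Function.comp, BEq.rfl, if_pos, hgetD, frags_append_singleton, BEq.rfl]
        rw [str_join_append_singleton _ _ (frags_ne_nil_of_mem_titles seen (pvKey tmp) hmem)]
      · have : (pvKey tmp == t) = false := by simp [Ne.symm hpk]
        simp [Function.comp, hpk, frags_append_singleton, this]
    · have hac : ¬ a.contains (pvKey tmp) = true := fun h => hmem (hconts.mp h)
      rw [if_pos (by simp [hac])]
      apply ih
      rw [PySem.Dict.items_insert_of_not_contains a _ (by simpa using hac), hitems,
          titles_append_singleton, if_neg hmem, List.map_append]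
      congr 1
      · apply List.map_congr_left
        intro t ht
        have : (pvKey tmp == t) = false := by
          simp only [beq_eq_false_iff_ne, ne_eq]
          intro h; exact hmem (h ▸ ht)
        simp [frags_append_singleton, this]
      · simp [frags_append_singleton,
          frags_eq_nil_of_not_mem_titles seen (pvKey tmp) hmem, str_join_singleton]

-- ===== VERDICT (by name: the statement is the Claim_ definition above) =====
theorem map_merge_cc_sametitle_spec : Claim_equal_map_merge_cc_sametitle := by
  intro row _ hpre
  unfold Spec_map_merge_cc_sametitle map_merge_cc_sametitle map_merge_cc_sametitle_alt
  obtain ⟨ctx, hctx⟩ := Option.isSome_iff_exists.mp hpre.1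
  rw [hctx]
  have hmain := loop_inv ctx [] PySem.Dict.empty (by simp [PySem.Dict.empty, pvTitles])
  simp only [List.nil_append] at hmain
  simp only [PySem.List.foldl_append_singleton_eq_map, List.nil_append, hmain, List.map_map]
  rfl
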